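-- pv_equiv track=rewrite | github.com/adamkhoja1/nonograms | Logic.py | construct_cycle_list
-- ===== SOURCE A (Python) =====
-- import math
--
-- def construct_cycle_list(numrows, numcols):
--     cycle_list = []
--     max_dim = max(numrows, numcols)
--     min_dim = min(numrows, numcols)
--     row_cycle_list = [math.ceil(index/2) if index%2 else -math.ceil(index/2) \
--         for index in range(numrows)]
--     col_cycle_list = [2*max_dim + math.ceil(index/2) if index%2 \
--         else 2*max_dim - math.ceil(index/2) \
--         for index in range(numcols)]
--     #Merge
--     for _ in range(min_dim):
--         cycle_list.append(row_cycle_list.pop(0))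
--         cycle_list.append(col_cycle_list.pop(0))
--     if row_cycle_list:
--         cycle_list.extend(row_cycle_list)
--     else:
--         cycle_list.extend(col_cycle_list)
--     return cycle_list
-- ===== SOURCE B (Python) =====
-- def construct_cycle_list(numrows, numcols):
--     # Single fused pass: emit row[i] then col[i] on the fly; no intermediate
--     # lists, no pop(0) merge loop.
--     out = []
--     m = max(numrows, numcols)
--     for i in range(m):
--         h = (i + 1) // 2          # == math.ceil(i/2) for i >= 0
--         if i < numrows:
--             out.append(h if i % 2 else -h)
--         if i < numcols:
--             out.append(2 * m + h if i % 2 else 2 * m - h)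
--     return out
-- ===== Notes on version B (the rewrite author's own statement) =====
-- stated objective: faster
-- what changed: Replaces the two materialized comprehension lists and the quadratic pop(0)-based merge loop with one fused pass over range(max) that emits each row/col value on the fly.
import Mathlib
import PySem

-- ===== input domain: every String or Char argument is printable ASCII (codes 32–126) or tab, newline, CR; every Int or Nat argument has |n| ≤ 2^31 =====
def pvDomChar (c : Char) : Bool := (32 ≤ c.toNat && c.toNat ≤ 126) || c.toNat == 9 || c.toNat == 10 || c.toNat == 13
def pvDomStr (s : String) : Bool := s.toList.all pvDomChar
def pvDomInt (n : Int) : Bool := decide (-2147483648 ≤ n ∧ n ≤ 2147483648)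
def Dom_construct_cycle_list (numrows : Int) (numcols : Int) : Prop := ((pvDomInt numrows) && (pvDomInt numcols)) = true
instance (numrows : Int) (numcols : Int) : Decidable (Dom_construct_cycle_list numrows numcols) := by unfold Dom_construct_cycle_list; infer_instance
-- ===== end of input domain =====

-- B replaces A's two comprehension lists + pop(0) merge loop with one fused pass emitting values on the fly (objective: faster).

-- ===== PORT A =====
-- 'for _ in range(min_dim): cycle_list.append(row.pop(0)); cycle_list.append(col.pop(0))'
-- ported as fuel recursion on (min_dim).toNat = length of range(min_dim); the empty-list
-- branch is unreachable (loop count = min of the two lengths, so pop(0) never raises).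
def pvMergeLoop : Nat → List Int → List Int → List Int → List Int × List Int × List Int
  | 0, acc, rs, cs => (acc, rs, cs)
  | n+1, acc, rs, cs =>
    match rs, cs with
    | r::rs', c::cs' => pvMergeLoop n (acc ++ [r, c]) rs' cs'
    | _, _ => (acc, rs, cs)

-- math.ceil(index/2) for index ≥ 0 (as produced by range) is exactly (index+1) floor-div 2;
-- exact on Dom (|int| ≤ 2^31 keeps the float division index/2 exact).
def construct_cycle_list (numrows : Int) (numcols : Int) : List Int :=
  let max_dim := max numrows numcols
  let min_dim := min numrows numcols
  let row_cycle_list := (PySem.List.pyRange 0 numrows 1).map (fun index =>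
    if PySem.Int.mod index 2 ≠ 0 then PySem.Int.floordiv (index+1) 2
    else -(PySem.Int.floordiv (index+1) 2))
  let col_cycle_list := (PySem.List.pyRange 0 numcols 1).map (fun index =>
    if PySem.Int.mod index 2 ≠ 0 then 2*max_dim + PySem.Int.floordiv (index+1) 2
    else 2*max_dim - PySem.Int.floordiv (index+1) 2)
  let s := pvMergeLoop min_dim.toNat [] row_cycle_list col_cycle_list
  if s.2.1 ≠ [] then s.1 ++ s.2.1 else s.1 ++ s.2.2

-- ===== PORT B =====
def construct_cycle_list_alt (numrows : Int) (numcols : Int) : List Int :=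
  let m := max numrows numcols
  (PySem.List.pyRange 0 m 1).foldl (fun out i =>
    let h := PySem.Int.floordiv (i+1) 2      -- (i+1)//2 == math.ceil(i/2) for i ≥ 0
    let out := if i < numrows then out ++ [if PySem.Int.mod i 2 ≠ 0 then h else -h] else out
    if i < numcols then out ++ [if PySem.Int.mod i 2 ≠ 0 then 2*m + h else 2*m - h] else out) []

-- ===== PRECONDITION & SPEC =====
def Spec_construct_cycle_list (numrows : Int) (numcols : Int) (out : List Int) : Prop := out = construct_cycle_list_alt numrows numcols
instance (numrows : Int) (numcols : Int) (out : List Int) : Decidable (Spec_construct_cycle_list numrows numcols out) := by unfold Spec_construct_cycle_list; infer_instance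

-- ===== CLAIM (what is proved, stated in full; the proofs are below) =====
def Claim_equal_construct_cycle_list : Prop := ∀ (numrows : Int) (numcols : Int), Dom_construct_cycle_list numrows numcols → Spec_construct_cycle_list numrows numcols (construct_cycle_list numrows numcols)

-- ===== LEMMAS AND PROOFS =====

/-- Common reference value: interleave two lists, appending whichever remains. -/
def pvItl : List Int → List Int → List Int
  | [], cs => cs
  | rs, [] => rs
  | r::rs, c::cs => r :: c :: pvItl rs cs

lemma pvItl_nil_left (cs : List Int) : pvItl [] cs = cs := by cases cs <;> rfl

lemma pvItl_nil_right (rs : List Int) : pvItl rs [] = rs := by cases rs <;> rfl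

lemma pvMergeLoop_itl (rs : List Int) : ∀ (cs acc : List Int),
    (let s := pvMergeLoop (min rs.length cs.length) acc rs cs;
     if s.2.1 ≠ [] then s.1 ++ s.2.1 else s.1 ++ s.2.2) = acc ++ pvItl rs cs := by
  induction rs with
  | nil =>
    intro cs acc
    simp [pvMergeLoop, pvItl_nil_left]
  | cons r rs' ih =>
    intro cs acc
    cases cs with
    | nil => simp [pvMergeLoop, pvItl]
    | cons c cs' =>
      have h : min (r::rs').length (c::cs').length = min rs'.length cs'.length + 1 := by
        simp only [List.length_cons]; omega
      rw [h]
      simpa [pvMergeLoop, pvItl] using ih cs' (acc ++ [r, c])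

/-- B's fused fold, started at any point `a`, appends the interleave of the remaining
row and column values. -/
lemma pvFoldB_itl (R C : Int) (fR fC : Int → Int) (hR : R ≤ max R C) (hC : C ≤ max R C) :
    ∀ (n : Nat) (a : Int) (acc : List Int), (max R C - a).toNat = n →
    (PySem.List.pyRange a (max R C) 1).foldl (fun out i =>
        let out := if i < R then out ++ [fR i] else out
        if i < C then out ++ [fC i] else out) acc
      = acc ++ pvItl ((PySem.List.pyRange a R 1).map fR) ((PySem.List.pyRange a C 1).map fC) := by
  intro n
  induction n with
  | zero =>
    intro a acc hn
    have ha : max R C ≤ a := by omega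
    rw [PySem.List.pyRange_one_eq_nil ha,
        PySem.List.pyRange_one_eq_nil (le_trans hR ha),
        PySem.List.pyRange_one_eq_nil (le_trans hC ha)]
    simp [pvItl]
  | succ n ih =>
    intro a acc hn
    have ha : a < max R C := by omega
    rw [PySem.List.pyRange_one_cons ha]
    simp only [List.foldl_cons]
    rw [ih (a+1) _ (by omega)]
    by_cases hr : a < R <;> by_cases hc : a < C
    · rw [PySem.List.pyRange_one_cons hr, PySem.List.pyRange_one_cons hc]
      simp [hr, hc, pvItl]
    · have hc' : C ≤ a := by omega
      rw [PySem.List.pyRange_one_cons hr,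
          PySem.List.pyRange_one_eq_nil hc',
          PySem.List.pyRange_one_eq_nil (show C ≤ a + 1 by omega)]
      simp [hr, hc, pvItl_nil_right]
    · have hr' : R ≤ a := by omega
      rw [PySem.List.pyRange_one_cons hc,
          PySem.List.pyRange_one_eq_nil hr',
          PySem.List.pyRange_one_eq_nil (show R ≤ a + 1 by omega)]
      simp [hr, hc, pvItl_nil_left]
    · omega

lemma pvA_eq_itl (numrows numcols : Int) :
    construct_cycle_list numrows numcols
      = pvItl ((PySem.List.pyRange 0 numrows 1).map (fun index =>
          if PySem.Int.mod index 2 ≠ 0 then PySem.Int.floordiv (index+1) 2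
          else -(PySem.Int.floordiv (index+1) 2)))
        ((PySem.List.pyRange 0 numcols 1).map (fun index =>
          if PySem.Int.mod index 2 ≠ 0 then 2*(max numrows numcols) + PySem.Int.floordiv (index+1) 2
          else 2*(max numrows numcols) - PySem.Int.floordiv (index+1) 2)) := by
  unfold construct_cycle_list
  have hlen : (min numrows numcols).toNat
      = min ((PySem.List.pyRange 0 numrows 1).map (fun index =>
          if PySem.Int.mod index 2 ≠ 0 then PySem.Int.floordiv (index+1) 2
          else -(PySem.Int.floordiv (index+1) 2))).length
            ((PySem.List.pyRange 0 numcols 1).map (fun index =>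
          if PySem.Int.mod index 2 ≠ 0 then 2*(max numrows numcols) + PySem.Int.floordiv (index+1) 2
          else 2*(max numrows numcols) - PySem.Int.floordiv (index+1) 2)).length := by
    simp [PySem.List.length_pyRange_one]; omega
  simp only []
  rw [hlen, pvMergeLoop_itl]
  simp

-- ===== VERDICT (by name: the statement is the Claim_ definition above) =====
theorem construct_cycle_list_spec : Claim_equal_construct_cycle_list := by
  intro numrows numcols _
  unfold Spec_construct_cycle_list construct_cycle_list_alt
  rw [pvA_eq_itl]
  rw [pvFoldB_itl numrows numcols _ _ (le_max_left _ _) (le_max_right _ _)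
      (max numrows numcols - 0).toNat 0 [] rfl]
  simp
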